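-- pv_equiv track=rewrite | github.com/MidnightMight/Job_Application_tracker | routes/auth.py | _safe_path
-- ===== SOURCE A (Python) =====
-- _PATH_OK_CHARS = frozenset(
--     "ABCDEFGHIJKLMNOPQRSTUVWXYZabcdefghijklmnopqrstuvwxyz"
--     "0123456789/_-.?=&%+#"
-- )
--
-- def _safe_path(path: str) -> str | None:
--     """Return path if it is a safe relative URL path, otherwise None.
--
--     The path must:
--     - Start with exactly one forward slash (not //)
--     - Contain only explicitly-allowed characters
--     - Not include a scheme or netloc
--     """
--     if not path or not path.startswith("/") or path.startswith("//"):
--         return None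
--     if len(path) > 2048:
--         return None
--     if not all(c in _PATH_OK_CHARS for c in path):
--         return None
--     return path
-- ===== SOURCE B (Python) =====
-- _PATH_OK_CHARS = frozenset(
--     "ABCDEFGHIJKLMNOPQRSTUVWXYZabcdefghijklmnopqrstuvwxyz"
--     "0123456789/_-.?=&%+#"
-- )
--
-- def _safe_path(path):
--     # single-pass DFA: state 0 = expect leading '/', 1 = just "/", 2 = body; -1 = reject
--     state = 0
--     n = 0
--     for c in path:
--         n += 1
--         if n > 2048 or c not in _PATH_OK_CHARS:
--             state = -1
--             break
--         if state == 0: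
--             state = 1 if c == "/" else -1
--         elif state == 1:
--             state = -1 if c == "/" else 2
--         if state == -1:
--             break
--     return path if state in (1, 2) else None
-- ===== Notes on version B (the rewrite author's own statement) =====
-- stated objective: alternative
-- what changed: Replaced A's three separate passes (two startswith prefix checks, a length check, and an all()-membership scan) by a single left-to-right DFA pass that tracks a state (expect-slash / just-slash / body) and a character count, rejecting as soon as a rule is violated.
import Mathlib
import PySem

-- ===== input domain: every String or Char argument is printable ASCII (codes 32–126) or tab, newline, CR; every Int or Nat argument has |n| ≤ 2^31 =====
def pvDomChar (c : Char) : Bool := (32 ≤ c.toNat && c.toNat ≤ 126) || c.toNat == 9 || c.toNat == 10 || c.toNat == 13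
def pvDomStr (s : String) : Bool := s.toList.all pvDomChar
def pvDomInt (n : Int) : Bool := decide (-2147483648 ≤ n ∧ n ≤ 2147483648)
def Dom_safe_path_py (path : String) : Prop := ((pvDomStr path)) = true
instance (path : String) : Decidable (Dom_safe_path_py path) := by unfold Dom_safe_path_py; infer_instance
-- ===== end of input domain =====

-- B replaces A's three separate passes (startswith checks, length check, all()-membership scan)
-- by a single-pass DFA over the characters; objective: alternative (one pass, same cost class).

-- ===== PORT A =====
def pathOkChars : PySem.Set Char :=
  PySem.Set.ofList ("ABCDEFGHIJKLMNOPQRSTUVWXYZabcdefghijklmnopqrstuvwxyz0123456789/_-.?=&%+#".toList)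

def safe_path_py (path : String) : Option String :=
  if path = "" ∨ ¬ PySem.Str.startswith path "/" ∨ PySem.Str.startswith path "//" then none
  else if PySem.Str.len path > 2048 then none
  else if ¬ path.toList.all (fun c => PySem.Set.contains pathOkChars c) then none
  else some path

-- ===== PORT B =====
-- the loop of Source B: state 0 = expect leading '/', 1 = just "/", 2 = body, -1 = reject (break)
def altLoop : Int → Int → List Char → Int
  | s, _, [] => s
  | s, n, c :: cs =>
    let n' := n + 1
    if n' > 2048 ∨ ¬ PySem.Set.contains pathOkChars c then -1
    else
      let s' := if s = 0 then (if c = '/' then 1 else -1)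
                else if s = 1 then (if c = '/' then -1 else 2)
                else s
      if s' = -1 then -1 else altLoop s' n' cs

def safe_path_py_alt (path : String) : Option String :=
  let st := altLoop 0 0 path.toList
  if st = 1 ∨ st = 2 then some path else none

-- ===== PRECONDITION & SPEC =====
def Spec_safe_path_py (path : String) (out : Option String) : Prop := out = safe_path_py_alt path
instance (path : String) (out : Option String) : Decidable (Spec_safe_path_py path out) := by unfold Spec_safe_path_py; infer_instance

-- ===== CLAIM (what is proved, stated in full; the proofs are below) =====
def Claim_equal_safe_path_py : Prop := ∀ (path : String), Dom_safe_path_py path → Spec_safe_path_py path (safe_path_py path)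

-- ===== LEMMAS AND PROOFS =====

set_option maxRecDepth 10000

lemma slash_ok : '/' ∈ pathOkChars := by decide

lemma tl1 : "/".toList = ['/'] := by decide

lemma tl2 : "//".toList = ['/', '/'] := by decide

lemma contains_iff (x : Char) : PySem.Set.contains pathOkChars x = true ↔ x ∈ pathOkChars := by
  simp [PySem.Set.contains]

-- first loop iteration of Source B (state 0: the leading character must be '/')
lemma altLoop_start (c : Char) (cs : List Char) :
    altLoop 0 0 (c :: cs) = if c = '/' ∧ c ∈ pathOkChars then altLoop 1 1 cs else -1 := by
  by_cases hok : c ∈ pathOkChars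
  · by_cases hc : c = '/'
    · simp only [altLoop]
      rw [if_neg (by push_neg; exact ⟨by norm_num, by simp [contains_iff, hok]⟩)]
      simp [hc, hok]
      intro h; exact absurd (hc ▸ hok) h
    · simp only [altLoop]
      rw [if_neg (by push_neg; exact ⟨by norm_num, by simp [contains_iff, hok]⟩)]
      simp [hc]
  · simp only [altLoop]
    rw [if_pos (Or.inr (by simp [contains_iff, hok])), if_neg (by simp [hok])]

-- second loop iteration of Source B (state 1: a second '/' is rejected)
lemma altLoop_one (d : Char) (ds : List Char) :
    altLoop 1 1 (d :: ds) = if ¬ d = '/' ∧ d ∈ pathOkChars then altLoop 2 2 ds else -1 := by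
  by_cases hok : d ∈ pathOkChars
  · by_cases hd : d = '/'
    · simp only [altLoop]
      rw [if_neg (by push_neg; exact ⟨by norm_num, by simp [contains_iff, hok]⟩)]
      simp [hd]
    · simp only [altLoop]
      rw [if_neg (by push_neg; exact ⟨by norm_num, by simp [contains_iff, hok]⟩)]
      simp [hd, hok]
  · simp only [altLoop]
    rw [if_pos (Or.inr (by simp [contains_iff, hok])), if_neg (by simp [hok])]

-- in state 2 the loop is just "all remaining chars ok and total count ≤ 2048"
lemma altLoop_two (cs : List Char) : ∀ n : Int, n ≤ 2048 →
    altLoop 2 n cs = if (∀ x ∈ cs, x ∈ pathOkChars) ∧ n + cs.length ≤ 2048 then 2 else -1 := by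
  induction cs with
  | nil => intro n hn; simp [altLoop, hn]
  | cons c cs ih =>
    intro n hn
    by_cases hok : c ∈ pathOkChars
    · by_cases hnn : n + 1 > 2048
      · simp only [altLoop, List.length_cons]
        rw [if_pos (by left; omega), if_neg]
        rintro ⟨-, hle⟩
        push_cast at hle; omega
      · simp only [altLoop, List.length_cons]
        rw [if_neg (by push_neg; exact ⟨by omega, by simp [contains_iff, hok]⟩)]
        norm_num
        rw [ih (n + 1) (by omega)]
        by_cases hall : ∀ x ∈ cs, x ∈ pathOkChars
        · have hfor : ∀ x ∈ c :: cs, x ∈ pathOkChars := by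
            intro x hx
            rcases List.mem_cons.mp hx with rfl | hx'
            · exact hok
            · exact hall x hx'
          by_cases hle : n + 1 + (cs.length : Int) ≤ 2048
          · rw [if_pos ⟨hall, hle⟩, if_pos ⟨⟨hok, fun a ha => hall a ha⟩, by push_cast; omega⟩]
          · rw [if_neg (fun hco => hle hco.2),
              if_neg (fun hco => hle (by have := hco.2; push_cast at this; omega))]
        · have hnall : ¬ ∀ x ∈ c :: cs, x ∈ pathOkChars := by
            intro h; exact hall (fun x hx => h x (List.mem_cons_of_mem _ hx))
          simp [hall, hnall]
    · have hnall : ¬ ((∀ x ∈ c :: cs, x ∈ pathOkChars) ∧ n + ((c :: cs).length : Int) ≤ 2048) := by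
        rintro ⟨h, -⟩; exact hok (h c List.mem_cons_self)
      simp only [altLoop]
      rw [if_pos (Or.inr (by simp [contains_iff, hok])), if_neg hnall]

lemma toList_eq_nil_iff (s : String) : s.toList = [] ↔ s = "" := by
  constructor
  · intro h
    have h2 := congrArg String.ofList h
    simpa using h2
  · intro h; simp [h]

lemma all_eq_forall (cs : List Char) :
    (cs.all fun c => PySem.Set.contains pathOkChars c) = true ↔ ∀ x ∈ cs, x ∈ pathOkChars := by
  simp [List.all_eq_true, contains_iff]

-- ===== VERDICT (by name: the statement is the Claim_ definition above) =====
theorem safe_path_py_spec : Claim_equal_safe_path_py := by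
  intro path _
  unfold Spec_safe_path_py safe_path_py safe_path_py_alt
  rcases hl : path.toList with _ | ⟨c, cs⟩
  · have hp : path = "" := (toList_eq_nil_iff path).mp hl
    simp [hp, altLoop]
  · have hne : ¬ path = "" := by
      intro h; rw [h] at hl; simp at hl
    simp only [PySem.Str.len_eq, PySem.Str.startswith_eq, hl, PySem.Chars.len_eq, tl1, tl2]
    by_cases hc : c = '/'
    · subst hc
      have gs1 : PySem.Chars.startswith ('/' :: cs) ['/'] = true := by
        rw [PySem.Chars.startswith_iff]; simp [List.cons_prefix_cons]
      rcases cs with _ | ⟨d, ds⟩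
      · -- path = "/"
        have gs2 : PySem.Chars.startswith ['/'] ['/', '/'] = false := by decide
        have hB : altLoop 0 0 ['/'] = 1 := by
          rw [altLoop_start, if_pos ⟨rfl, slash_ok⟩]; rfl
        simp [hne, gs1, gs2, hB, all_eq_forall, slash_ok]
      · by_cases hd : d = '/'
        · -- "//" prefix: both reject
          subst hd
          have gs2 : PySem.Chars.startswith ('/' :: '/' :: ds) ['/', '/'] = true := by
            rw [PySem.Chars.startswith_iff]; simp [List.cons_prefix_cons]
          have hB : altLoop 0 0 ('/' :: '/' :: ds) = -1 := by
            rw [altLoop_start, if_pos ⟨rfl, slash_ok⟩, altLoop_one, if_neg (by simp)]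
          simp [gs2, hB]
        · -- "/d…", d ≠ '/': the main case
          have gs2 : PySem.Chars.startswith ('/' :: d :: ds) ['/', '/'] = false := by
            rw [← Bool.not_eq_true, PySem.Chars.startswith_iff]
            simp only [List.cons_prefix_cons]
            rintro ⟨-, h, -⟩; exact hd h.symm
          have hB1 : altLoop 0 0 ('/' :: d :: ds) = altLoop 1 1 (d :: ds) := by
            rw [altLoop_start, if_pos ⟨rfl, slash_ok⟩]
          by_cases hokd : d ∈ pathOkChars
          · have hB2 : altLoop 0 0 ('/' :: d :: ds) =
                if (∀ x ∈ ds, x ∈ pathOkChars) ∧ (2 : Int) + ds.length ≤ 2048 then 2 else -1 := by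
              rw [hB1, altLoop_one, if_pos ⟨hd, hokd⟩, altLoop_two ds 2 (by omega)]
            by_cases hall : ∀ x ∈ ds, x ∈ pathOkChars
            · by_cases hlen : (2 : Int) + ds.length ≤ 2048
              · have hallA : ((('/' : Char) :: d :: ds).all
                    fun c => PySem.Set.contains pathOkChars c) = true := by
                  rw [all_eq_forall]
                  intro x hx
                  rcases List.mem_cons.mp hx with rfl | hx'
                  · exact slash_ok
                  · rcases List.mem_cons.mp hx' with rfl | hx''
                    · exact hokd
                    · exact hall x hx''
                have hlenA : ¬ ((((('/' : Char) :: d :: ds).length : Int)) > 2048) := by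
                  simp only [List.length_cons]; push_cast; omega
                have e2 : ¬ ('/' ∈ pathOkChars → d ∈ pathOkChars → ∃ x ∈ ds, x ∉ pathOkChars) := by
                  intro h
                  rcases h slash_ok hokd with ⟨x, hx, hb⟩
                  exact hb (hall x hx)
                simp [hne, gs1, gs2, hallA, hlenA, hB2, hall, hlen]
                rw [if_neg (show ¬ ((2048 : Int) ≤ (ds.length : Int) + 1) by omega),
                  if_neg e2, if_pos (Or.inr hall)]
              · have hlenA : ((((('/' : Char) :: d :: ds).length : Int)) > 2048) := by
                  simp only [List.length_cons]; push_cast; omega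
                simp [hne, gs1, gs2, hlenA, hB2, hall, hlen]
                intro h1 _ _
                exact absurd (show (2 : Int) + (ds.length : Int) ≤ 2048 by omega) hlen
            · have hallA : ¬ ((('/' : Char) :: d :: ds).all
                  fun c => PySem.Set.contains pathOkChars c) = true := by
                rw [all_eq_forall]
                intro h
                exact hall (fun x hx => h x (by simp [hx]))
              by_cases hlenA : ((((('/' : Char) :: d :: ds).length : Int)) > 2048)
              · simp [hne, gs1, gs2, hlenA, hB2, hall]
              · simp [hne, gs1, gs2, hlenA, hallA, hB2, hall]
          · have hB2 : altLoop 0 0 ('/' :: d :: ds) = -1 := by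
              rw [hB1, altLoop_one, if_neg (fun hco => hokd hco.2)]
            have hallA : ¬ ((('/' : Char) :: d :: ds).all
                fun c => PySem.Set.contains pathOkChars c) = true := by
              rw [all_eq_forall]
              intro h
              exact hokd (h d (by simp))
            by_cases hlenA : ((((('/' : Char) :: d :: ds).length : Int)) > 2048)
            · simp [hne, gs1, gs2, hB2, hlenA]
              intro _ _ h3
              exact absurd h3 hokd
            · simp [hne, gs1, gs2, hB2, hlenA, hallA]
              intro _ _ h3
              exact absurd h3 hokd
    · -- first char not '/': A rejects via startswith, B's first step rejects
      have gs1 : PySem.Chars.startswith (c :: cs) ['/'] = false := by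
        rw [← Bool.not_eq_true, PySem.Chars.startswith_iff]
        simp only [List.cons_prefix_cons]
        rintro ⟨h, -⟩; exact hc h.symm
      have hB : altLoop 0 0 (c :: cs) = -1 := by
        rw [altLoop_start, if_neg (by rintro ⟨h, -⟩; exact hc h)]
      simp [gs1, hB]
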